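-- pv_equiv track=rewrite | github.com/Strikeborn/Sketchfab_API | src/collector.py | _auto_assign
-- ===== SOURCE A (Python) =====
-- SINGLE_ASSIGNMENT_COLLECTIONS = {"hands", "gauntlets", "feet", "shoes"}
--
-- def _auto_assign(tags_str: str, suggested_str: str, fuzzy_str: str) -> str:
--     tags      = [t.strip().lower() for t in (tags_str or "").split(",") if t.strip()]
--     suggested = [s.strip().lower() for s in (suggested_str or "").split(",") if s.strip()]
--     fuzzy     = [f.strip().lower() for f in (fuzzy_str or "").split(",") if f.strip()]
--     all_cands = set(tags + suggested + fuzzy)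
--     votes = {c: sum([c in tags, c in suggested, c in fuzzy]) for c in all_cands}
--     strong = [c for c, n in votes.items() if n == 3]
--     singles = [c for c in strong if c in SINGLE_ASSIGNMENT_COLLECTIONS]
--     if len(singles) == 1: return singles[0]
--     if len(singles) > 1:  return ""
--     return ", ".join(sorted(strong))
-- ===== SOURCE B (Python) =====
-- SINGLE_ASSIGNMENT_COLLECTIONS = {"hands", "gauntlets", "feet", "shoes"}
--
-- def _clean(s: str) -> list:
--     # cleaned tokens, first occurrences only (order-preserving dedup)
--     return list(dict.fromkeys(
--         t.strip().lower() for t in (s or "").split(",") if t.strip()))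
--
-- def _auto_assign(tags_str: str, suggested_str: str, fuzzy_str: str) -> str:
--     # Sort the three deduped token lists together and scan runs: a token is
--     # "strong" exactly when its run has length 3 (present in all three sources).
--     pool = sorted(_clean(tags_str) + _clean(suggested_str) + _clean(fuzzy_str))
--     strong = []          # comes out already sorted, so no final sort is needed
--     rest = pool
--     while rest:
--         x = rest[0]
--         k = 1
--         while k < len(rest) and rest[k] == x:
--             k += 1
--         if k == 3:
--             strong.append(x)
--         rest = rest[k:]
--     singles = [c for c in strong if c in SINGLE_ASSIGNMENT_COLLECTIONS]
--     if len(singles) == 1: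
--         return singles[0]
--     if len(singles) > 1:
--         return ""
--     return ", ".join(strong)
-- ===== Notes on version B (the rewrite author's own statement) =====
-- stated objective: alternative
-- what changed: Replaces A's candidate-union set and per-candidate membership-vote dict with sort-then-scan: the three deduped token lists are sorted into one pool and a run-length scan collects tokens whose run is exactly 3, which also yields the strong list already sorted so the final sort is dropped.
import Mathlib
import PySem

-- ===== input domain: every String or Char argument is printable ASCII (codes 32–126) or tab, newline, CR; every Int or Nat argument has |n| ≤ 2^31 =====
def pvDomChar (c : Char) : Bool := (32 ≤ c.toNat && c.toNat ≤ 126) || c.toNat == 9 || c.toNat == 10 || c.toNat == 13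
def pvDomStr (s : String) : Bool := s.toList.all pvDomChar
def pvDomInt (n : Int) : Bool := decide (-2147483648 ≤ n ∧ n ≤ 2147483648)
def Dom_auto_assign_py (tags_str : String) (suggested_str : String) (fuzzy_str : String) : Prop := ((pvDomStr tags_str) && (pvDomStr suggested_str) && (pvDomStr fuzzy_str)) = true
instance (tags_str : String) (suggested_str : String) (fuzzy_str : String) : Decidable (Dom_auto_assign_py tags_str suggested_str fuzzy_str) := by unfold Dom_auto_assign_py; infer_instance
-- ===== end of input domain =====

-- B replaces A's vote-tally (candidate set + membership-count dict) by sort-then-scan: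
-- the three deduped token lists are sorted together and runs of length 3 are collected
-- (already in sorted order, so the final sort disappears too). Objective: alternative.


-- shared module constant: SINGLE_ASSIGNMENT_COLLECTIONS
def pvSingleColl : PySem.Set String := PySem.Set.ofList ["hands", "gauntlets", "feet", "shoes"]

-- ===== PORT A =====
-- A's parsing line: [t.strip().lower() for t in (s or "").split(",") if t.strip()]
-- ('s or ""' is s itself for strings; split(",") has a non-empty separator, so split? is some)
def pvClean (s : String) : List String :=
  (((PySem.Str.split? s ",").getD []).filter
      (fun t => !(PySem.Str.strip t == ""))).map
    (fun t => PySem.Str.lower (PySem.Str.strip t))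

def auto_assign_py (tags_str : String) (suggested_str : String) (fuzzy_str : String) : String :=
  let tags := pvClean tags_str
  let suggested := pvClean suggested_str
  let fuzzy := pvClean fuzzy_str
  let all_cands := PySem.Set.ofList (tags ++ suggested ++ fuzzy)
  -- votes = {c: sum([c in tags, c in suggested, c in fuzzy]) for c in all_cands}
  let votes : PySem.Dict String Int :=
    all_cands.foldl
      (fun d c => d.insert c
        (([tags.contains c, suggested.contains c, fuzzy.contains c].map
            (fun b => if b then (1 : Int) else 0)).sum))
      PySem.Dict.empty
  let strong := ((votes.items.filter (fun p => p.2 == 3)).map (·.1))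
  let singles := strong.filter (fun c => pvSingleColl.contains c)
  if singles.length == 1 then singles.headD ""
  else if singles.length > 1 then ""
  else PySem.Str.join ", " (PySem.List.sorted strong (fun c => c))

-- ===== PORT B =====
-- B's _clean: list(dict.fromkeys(t.strip().lower() for t in (s or "").split(",") if t.strip()))
def pvCleanB (s : String) : List String :=
  PySem.List.dedup
    ((((PySem.Str.split? s ",").getD []).filter
        (fun t => !(PySem.Str.strip t == ""))).map
      (fun t => PySem.Str.lower (PySem.Str.strip t)))

-- B's run-length scan over the sorted pool (the two nested while loops: the inner loop
-- measures the run of x at the front, the outer advances rest = rest[k:])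
def pvRunScan : List String → List String
  | [] => []
  | x :: xs =>
    let run := xs.takeWhile (fun y => y == x)
    let rest := xs.dropWhile (fun y => y == x)
    if run.length + 1 == 3 then x :: pvRunScan rest else pvRunScan rest
  termination_by l => l.length
  decreasing_by
    all_goals simpa using Nat.lt_succ_of_le (List.length_dropWhile_le (fun y => y == x) xs)

def auto_assign_py_alt (tags_str : String) (suggested_str : String) (fuzzy_str : String) : String :=
  let pool := PySem.List.sorted (pvCleanB tags_str ++ pvCleanB suggested_str ++ pvCleanB fuzzy_str)
      (fun c => c)
  let strong := pvRunScan pool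
  let singles := strong.filter (fun c => pvSingleColl.contains c)
  if singles.length == 1 then singles.headD ""
  else if singles.length > 1 then ""
  else PySem.Str.join ", " strong

-- ===== PRECONDITION & SPEC =====
def Spec_auto_assign_py (tags_str : String) (suggested_str : String) (fuzzy_str : String) (out : String) : Prop := out = auto_assign_py_alt tags_str suggested_str fuzzy_str
instance (tags_str : String) (suggested_str : String) (fuzzy_str : String) (out : String) : Decidable (Spec_auto_assign_py tags_str suggested_str fuzzy_str out) := by unfold Spec_auto_assign_py; infer_instance

-- ===== CLAIM (what is proved, stated in full; the proofs are below) =====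
def Claim_equal_auto_assign_py : Prop := ∀ (tags_str : String) (suggested_str : String) (fuzzy_str : String), Dom_auto_assign_py tags_str suggested_str fuzzy_str → Spec_auto_assign_py tags_str suggested_str fuzzy_str (auto_assign_py tags_str suggested_str fuzzy_str)

-- ===== LEMMAS AND PROOFS =====

-- A's 'strong' list is (a permutation of) the three-way intersection of the deduped token lists
theorem pv_strong_perm (T S F : List String) :
    ((( (PySem.Set.ofList (T ++ S ++ F)).foldl
        (fun d c => d.insert c
          (([T.contains c, S.contains c, F.contains c].map
              (fun b => if b then (1 : Int) else 0)).sum))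
        PySem.Dict.empty).items.filter (fun p => p.2 == 3)).map (·.1)).Perm
      (((PySem.Set.ofList T).inter (PySem.Set.ofList S)).inter (PySem.Set.ofList F)) := by
  rw [PySem.Dict.items_foldl_insert_fresh (PySem.Set.ofList (T ++ S ++ F)) (fun c => c)
      (fun c => ([T.contains c, S.contains c, F.contains c].map (fun b => if b then (1:Int) else 0)).sum)
      PySem.Dict.empty (by intro a _; simp) (by simp)]
  have hempty : (PySem.Dict.empty : PySem.Dict String Int).items = [] := rfl
  rw [hempty, List.nil_append, List.filter_map, List.map_map]
  apply (List.perm_ext_iff_of_nodup ?_ ?_).mpr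
  · intro c
    simp only [Function.comp, List.mem_map, List.mem_filter, PySem.Set.mem_inter,
      PySem.Set.mem_ofList, List.mem_append]
    constructor
    · rintro ⟨a, ⟨ha, hv⟩, rfl⟩
      revert hv
      rcases hT : T.contains a <;> rcases hS : S.contains a <;> rcases hF : F.contains a <;>
        simp_all [List.contains_eq_mem]
    · intro ⟨⟨h1, h2⟩, h3⟩
      refine ⟨c, ⟨by tauto, ?_⟩, rfl⟩
      simp [List.contains_eq_mem, h1, h2, h3]
  · refine List.Nodup.map ?_ (List.Nodup.filter _ (PySem.Set.nodup_ofList (T ++ S ++ F)))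
    intro a b h; simpa [Function.comp] using h
  · exact PySem.Set.nodup_inter _ _ (PySem.Set.nodup_inter _ _ (PySem.Set.nodup_ofList T))

theorem pv_lt_of_mem_dropWhile (x : String) (xs : List String)
    (hs : (x :: xs).Pairwise (· ≤ ·)) :
    ∀ y ∈ xs.dropWhile (fun z => z == x), x < y := by
  induction xs with
  | nil => simp
  | cons a as ih =>
    by_cases h : (a == x) = true
    · intro y hy
      simp only [List.dropWhile_cons, h, if_true] at hy
      have hs' : (x :: as).Pairwise (· ≤ ·) :=
        List.Pairwise.sublist (by simp) hs
      exact ih hs' y hy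
    · intro y hy
      simp only [List.dropWhile_cons, h, if_false, Bool.false_eq_true] at hy
      have hxa : x ≤ a := (List.pairwise_cons.mp hs).1 a (by simp)
      have hax : a ≠ x := by simpa using h
      have hlt : x < a := lt_of_le_of_ne hxa (Ne.symm hax)
      rcases List.mem_cons.mp hy with rfl | hy'
      · exact hlt
      · have haas : (a :: as).Pairwise (· ≤ ·) := (List.pairwise_cons.mp hs).2
        exact lt_of_lt_of_le hlt ((List.pairwise_cons.mp haas).1 y hy')

theorem pvRunScan_spec (l : List String) (hs : l.Pairwise (· ≤ ·)) :
    (∀ x, x ∈ pvRunScan l ↔ x ∈ l ∧ l.count x = 3) ∧ (pvRunScan l).Pairwise (· < ·) := by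
  induction l using pvRunScan.induct with
  | case1 => simp [pvRunScan]
  | case2 x xs run rest hcond ih =>
    have hsplit : run ++ rest = xs := List.takeWhile_append_dropWhile
    have hrun : ∀ y ∈ run, y = x := by
      intro y hy
      have := List.mem_takeWhile_imp hy
      simpa using this
    have hlt : ∀ y ∈ rest, x < y := pv_lt_of_mem_dropWhile x xs hs
    have hrest_pw : rest.Pairwise (· ≤ ·) :=
      List.Pairwise.sublist (List.Sublist.trans (List.dropWhile_sublist _)
        (List.sublist_cons_self x xs)) hs
    have hnx : x ∉ rest := fun hx => lt_irrefl x (hlt x hx)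
    have hcx : (x :: xs).count x = run.length + 1 := by
      rw [← hsplit, List.count_cons_self, List.count_append]
      rw [List.count_eq_zero.mpr hnx]
      have : run.count x = run.length := by
        rw [List.count_eq_length]; intro b hb; exact (hrun b hb).symm
      omega
    have hcy : ∀ y, y ≠ x → (x :: xs).count y = rest.count y := by
      intro y hyx
      have hruny : run.count y = 0 := List.count_eq_zero.mpr (fun hy => hyx (hrun y hy))
      rw [← hsplit]
      simp [List.count_append, hruny, Ne.symm hyx]
    obtain ⟨ihm, ihp⟩ := ih hrest_pw
    have hmem_rest : ∀ y, y ∈ rest → y ∈ x :: xs := by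
      intro y hy
      exact List.mem_cons_of_mem x (hsplit ▸ List.mem_append_right run hy)
    have hstep : pvRunScan (x :: xs) = x :: pvRunScan rest := by
      rw [pvRunScan, if_pos hcond]
    have h3 : run.length = 2 := by simpa using hcond
    constructor
    · intro y
      rw [hstep]
      by_cases hyx : y = x
      · subst hyx
        simp only [List.mem_cons, true_or, true_iff]
        exact ⟨by simp, by omega⟩
      · simp only [List.mem_cons, hyx, false_or]
        rw [ihm y, hcy y hyx]
        constructor
        · rintro ⟨h1, h2⟩; exact ⟨hsplit ▸ List.mem_append_right run h1, h2⟩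
        · rintro ⟨h1, h2⟩
          have : y ∈ run ++ rest := hsplit ▸ h1
          rcases List.mem_append.mp this with hr | hr
          · exact absurd (hrun y hr) hyx
          · exact ⟨hr, h2⟩
    · rw [hstep]
      refine List.pairwise_cons.mpr ⟨?_, ihp⟩
      intro y hy
      exact hlt y ((ihm y).mp hy).1
  | case3 x xs run rest hcond ih =>
    have hsplit : run ++ rest = xs := List.takeWhile_append_dropWhile
    have hrun : ∀ y ∈ run, y = x := by
      intro y hy
      have := List.mem_takeWhile_imp hy
      simpa using this
    have hlt : ∀ y ∈ rest, x < y := pv_lt_of_mem_dropWhile x xs hs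
    have hrest_pw : rest.Pairwise (· ≤ ·) :=
      List.Pairwise.sublist (List.Sublist.trans (List.dropWhile_sublist _)
        (List.sublist_cons_self x xs)) hs
    have hnx : x ∉ rest := fun hx => lt_irrefl x (hlt x hx)
    have hcx : (x :: xs).count x = run.length + 1 := by
      rw [← hsplit, List.count_cons_self, List.count_append]
      rw [List.count_eq_zero.mpr hnx]
      have : run.count x = run.length := by
        rw [List.count_eq_length]; intro b hb; exact (hrun b hb).symm
      omega
    have hcy : ∀ y, y ≠ x → (x :: xs).count y = rest.count y := by
      intro y hyx
      have hruny : run.count y = 0 := List.count_eq_zero.mpr (fun hy => hyx (hrun y hy))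
      rw [← hsplit]
      simp [List.count_append, hruny, Ne.symm hyx]
    obtain ⟨ihm, ihp⟩ := ih hrest_pw
    have hmem_rest : ∀ y, y ∈ rest → y ∈ x :: xs := by
      intro y hy
      exact List.mem_cons_of_mem x (hsplit ▸ List.mem_append_right run hy)
    have hstep : pvRunScan (x :: xs) = pvRunScan rest := by
      rw [pvRunScan, if_neg hcond]
    have h3 : run.length ≠ 2 := by simpa using hcond
    constructor
    · intro y
      rw [hstep, ihm y]
      by_cases hyx : y = x
      · subst hyx
        simp only [hnx, false_and, false_iff, not_and]
        intro _
        omega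
      · rw [hcy y hyx]
        constructor
        · rintro ⟨h1, h2⟩; exact ⟨hmem_rest y h1, h2⟩
        · rintro ⟨h1, h2⟩
          rcases List.mem_cons.mp h1 with rfl | h1'
          · exact absurd rfl hyx
          · have : y ∈ run ++ rest := hsplit ▸ h1'
            rcases List.mem_append.mp this with hr | hr
            · exact absurd (hrun y hr) hyx
            · exact ⟨hr, h2⟩
    · rw [hstep]; exact ihp

-- B's strong list is a strictly sorted permutation of A's strong list
theorem pv_strongB_perm (ct cs cf : List String) :
    (pvRunScan (PySem.List.sorted
        (PySem.List.dedup ct ++ PySem.List.dedup cs ++ PySem.List.dedup cf) (fun c => c))).Perm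
      (((PySem.Set.ofList ct).inter (PySem.Set.ofList cs)).inter (PySem.Set.ofList cf)) := by
  set pool0 := PySem.List.dedup ct ++ PySem.List.dedup cs ++ PySem.List.dedup cf with hpool0
  set pool := PySem.List.sorted pool0 (fun c => c) with hpool
  have hpw : pool.Pairwise (· ≤ ·) := by
    have := PySem.List.sorted_pairwise pool0 (fun c => c)
    simpa using this
  obtain ⟨hmem, hplt⟩ := pvRunScan_spec pool hpw
  apply (List.perm_ext_iff_of_nodup (hplt.imp fun h => ne_of_lt h) ?_).mpr
  · intro y
    rw [hmem y]
    have hcnt : pool.count y = pool0.count y := (PySem.List.sorted_perm pool0 (fun c => c) false).count_eq y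
    have hmemp : y ∈ pool ↔ y ∈ pool0 := by
      rw [hpool, PySem.List.mem_sorted]
    have hT := PySem.Set.nodup_ofList ct
    have hS := PySem.Set.nodup_ofList cs
    have hF := PySem.Set.nodup_ofList cf
    have hcT : (PySem.List.dedup ct).count y ≤ 1 := by
      rw [PySem.List.dedup_eq_ofList]; exact List.nodup_iff_count_le_one.mp hT y
    have hcS : (PySem.List.dedup cs).count y ≤ 1 := by
      rw [PySem.List.dedup_eq_ofList]; exact List.nodup_iff_count_le_one.mp hS y
    have hcF : (PySem.List.dedup cf).count y ≤ 1 := by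
      rw [PySem.List.dedup_eq_ofList]; exact List.nodup_iff_count_le_one.mp hF y
    have hsum : pool0.count y =
        (PySem.List.dedup ct).count y + (PySem.List.dedup cs).count y + (PySem.List.dedup cf).count y := by
      rw [hpool0, List.count_append, List.count_append]
    simp only [PySem.Set.mem_inter, PySem.Set.mem_ofList]
    constructor
    · rintro ⟨_, h3⟩
      rw [hcnt, hsum] at h3
      have h1 : (PySem.List.dedup ct).count y = 1 := by omega
      have h2 : (PySem.List.dedup cs).count y = 1 := by omega
      have h4 : (PySem.List.dedup cf).count y = 1 := by omega
      refine ⟨⟨?_, ?_⟩, ?_⟩ <;>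
        [ (have := List.count_pos_iff.mp (by omega : 0 < (PySem.List.dedup ct).count y));
          (have := List.count_pos_iff.mp (by omega : 0 < (PySem.List.dedup cs).count y));
          (have := List.count_pos_iff.mp (by omega : 0 < (PySem.List.dedup cf).count y))] <;>
        · rw [PySem.List.dedup_eq_ofList] at this
          exact (PySem.Set.mem_ofList _ _).mp this
    · rintro ⟨⟨h1, h2⟩, h4⟩
      have m1 : y ∈ PySem.List.dedup ct := by
        rw [PySem.List.dedup_eq_ofList]; exact (PySem.Set.mem_ofList _ _).mpr h1
      have m2 : y ∈ PySem.List.dedup cs := by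
        rw [PySem.List.dedup_eq_ofList]; exact (PySem.Set.mem_ofList _ _).mpr h2
      have m3 : y ∈ PySem.List.dedup cf := by
        rw [PySem.List.dedup_eq_ofList]; exact (PySem.Set.mem_ofList _ _).mpr h4
      have c1 := List.count_pos_iff.mpr m1
      have c2 := List.count_pos_iff.mpr m2
      have c3 := List.count_pos_iff.mpr m3
      constructor
      · rw [hmemp, hpool0]
        exact List.mem_append_left _ (List.mem_append_left _ m1)
      · rw [hcnt, hsum]; omega
  · exact PySem.Set.nodup_inter _ _ (PySem.Set.nodup_inter _ _ (PySem.Set.nodup_ofList ct))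

-- from a permutation (with B's side strictly sorted), the three-branch decisions agree
theorem pv_branch_eq (xs ys : List String) (h : ys.Perm xs) (hys : ys.Pairwise (· < ·)) :
    (let singles := xs.filter (fun c => pvSingleColl.contains c)
     if singles.length == 1 then singles.headD ""
     else if singles.length > 1 then ""
     else PySem.Str.join ", " (PySem.List.sorted xs (fun c => c))) =
    (let singles := ys.filter (fun c => pvSingleColl.contains c)
     if singles.length == 1 then singles.headD ""
     else if singles.length > 1 then ""
     else PySem.Str.join ", " ys) := by
  have hs : (xs.filter (fun c => pvSingleColl.contains c)).Perm
      (ys.filter (fun c => pvSingleColl.contains c)) :=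
    (h.filter (fun c => pvSingleColl.contains c)).symm
  have hsortxs : PySem.List.sorted xs (fun c => c) = ys :=
    PySem.List.sorted_eq_of_perm_of_pairwise_lt xs ys (fun c => c) h hys
  simp only []
  set u := xs.filter (fun c => pvSingleColl.contains c) with hu
  set v := ys.filter (fun c => pvSingleColl.contains c) with hv
  have hlen : u.length = v.length := hs.length_eq
  by_cases h1 : u.length = 1
  · obtain ⟨a, ha⟩ := List.length_eq_one_iff.mp h1
    have hv1 : v = [a] := List.perm_singleton.mp (ha ▸ hs).symm
    simp [ha, hv1]
  · rw [hlen] at h1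
    have g1 : (u.length == 1) = false := by simp [hlen, h1]
    have g2 : (v.length == 1) = false := by simp [h1]
    rw [g1, g2]
    simp only [Bool.false_eq_true, if_false]
    rw [hlen, hsortxs]

theorem pv_main (t s f : String) : auto_assign_py t s f = auto_assign_py_alt t s f := by
  have hB : pvCleanB t = PySem.List.dedup (pvClean t) := rfl
  have hB2 : pvCleanB s = PySem.List.dedup (pvClean s) := rfl
  have hB3 : pvCleanB f = PySem.List.dedup (pvClean f) := rfl
  unfold auto_assign_py auto_assign_py_alt
  rw [hB, hB2, hB3]
  exact pv_branch_eq _ _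
    ((pv_strongB_perm (pvClean t) (pvClean s) (pvClean f)).trans
      (pv_strong_perm (pvClean t) (pvClean s) (pvClean f)).symm)
    (pvRunScan_spec _ (by
      simpa using PySem.List.sorted_pairwise
        (PySem.List.dedup (pvClean t) ++ PySem.List.dedup (pvClean s) ++ PySem.List.dedup (pvClean f))
        (fun c : String => c))).2

-- ===== VERDICT (by name: the statement is the Claim_ definition above) =====
theorem auto_assign_py_spec : Claim_equal_auto_assign_py := by
  intro t s f _
  unfold Spec_auto_assign_py
  exact pv_main t s f
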